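-- pv_equiv track=rewrite | github.com/jensengrouppsu/chemPackage | src/mfunc/conversions.py | dhms2sec
-- ===== SOURCE A (Python) =====
-- def dhms2sec(dhms):
--     '''Return the number of seconds from a number in D:H:M:S format.'''
--     # Add trailing zeros if dhms ends in ':'
--     if dhms[-1] == ':': dhms += '00'
--     seconds = None
--     nums = dhms.split(':')
--     if [n for n in nums if n.isdigit()]:
--         seconds = int(nums.pop()) # Last index is seconds.
--         if nums: seconds += int(nums.pop()) * 60 # Next is minutes.
--         if nums: seconds += int(nums.pop()) * 3600 # Next is hours.
--         if nums: seconds += int(nums.pop()) * 86400 # Last is days.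
--     return seconds
-- ===== SOURCE B (Python) =====
-- def dhms2sec(dhms):
--     '''Return the number of seconds from a number in D:H:M:S format.'''
--     # Add trailing zeros if dhms ends in ':'
--     if dhms.endswith(':'):
--         dhms += '00'
--     nums = dhms.split(':')
--     if not any(n.isdigit() for n in nums):
--         return None
--     # Horner evaluation with mixed radices (days->hours 24, then 60, 60):
--     # ((d*24 + h)*60 + m)*60 + s, left to right over the last four fields.
--     fields = nums[-4:]
--     total = int(fields[0])
--     for base, field in zip((24, 60, 60)[4 - len(fields):], fields[1:]):
--         total = total * base + int(field)
--     return total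
-- ===== Notes on version B (the rewrite author's own statement) =====
-- stated objective: alternative
-- what changed: Replaces A's right-to-left per-field weight accumulation (pop each field and multiply by 1/60/3600/86400) by a left-to-right Horner evaluation with mixed radices: take the last four fields and fold total = total*base + int(field) over bases (24, 60, 60), so no weight table or pop cascade exists at all.
import Mathlib
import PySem

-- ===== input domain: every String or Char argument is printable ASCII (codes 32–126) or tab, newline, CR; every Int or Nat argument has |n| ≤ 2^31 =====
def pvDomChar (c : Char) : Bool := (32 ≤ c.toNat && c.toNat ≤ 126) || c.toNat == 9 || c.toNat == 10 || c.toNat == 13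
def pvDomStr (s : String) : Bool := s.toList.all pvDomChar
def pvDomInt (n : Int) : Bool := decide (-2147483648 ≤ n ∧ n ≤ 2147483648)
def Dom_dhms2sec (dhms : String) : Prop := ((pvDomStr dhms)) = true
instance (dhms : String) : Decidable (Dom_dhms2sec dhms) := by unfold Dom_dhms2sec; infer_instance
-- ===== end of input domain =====

-- B replaces A's right-to-left weight-table accumulation by a left-to-right Horner
-- evaluation with mixed radices (24, 60, 60) over the last four fields (objective:
-- alternative). Return-value equivalence only.

-- ===== PORT A =====
-- Literal transliteration of A: pad a trailing colon, split the string, gate on the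
-- (truthy) list of digit-fields, then the unrolled pop cascade; int() failure
-- (ValueError) is `none`, excluded by Pre_.  The split uses `(split? · ":").getD []`,
-- exact here since the separator ":" is non-empty (split? is none only for sep = "").
-- A's pop cascade — the body of A's gate branch, verbatim.
def cascadeA (nums : List String) : Option Int :=
  match PySem.List.pop? nums with
  | none => none
  | some (s0, r1) =>
    match PySem.Int.ofStr? s0 with
    | none => none
    | some sec0 =>
      if r1 ≠ [] then
        match PySem.List.pop? r1 with
        | none => none
        | some (s1, r2) =>
          match PySem.Int.ofStr? s1 with
          | none => none
          | some v1 =>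
            let sec1 := sec0 + v1 * 60
            if r2 ≠ [] then
              match PySem.List.pop? r2 with
              | none => none
              | some (s2, r3) =>
                match PySem.Int.ofStr? s2 with
                | none => none
                | some v2 =>
                  let sec2 := sec1 + v2 * 3600
                  if r3 ≠ [] then
                    match PySem.List.pop? r3 with
                    | none => none
                    | some (s3, _) =>
                      match PySem.Int.ofStr? s3 with
                      | none => none
                      | some v3 => some (sec2 + v3 * 86400)
                  else some sec2
            else some sec1
      else some sec0

def dhms2sec (dhms : String) : Option Int :=
  let d := if PySem.Str.pyGet? dhms (-1) == some ':' then dhms ++ "00" else dhms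
  let nums := (PySem.Str.split? d ":").getD []
  if (nums.filter (fun n => PySem.Str.strIsdigit n)) ≠ [] then cascadeA nums else none

-- ===== PORT B =====
-- Literal transliteration of Source B: endswith-pad, split, any-isdigit gate, then the
-- Horner loop total = total*base + int(field) over zip((24,60,60)[4-len(fields):],
-- fields[1:]) where fields = nums[-4:] (int() failure = none, excluded by Pre_).
-- B's Horner loop — fields[0] on the empty list is an IndexError (`none`;
-- unreachable: split always yields at least one field).
def hornerB (fields : List String) : Option Int :=
  match fields with
  | [] => none
  | f0 :: rest =>
    (PySem.Int.ofStr? f0).bind (fun t0 =>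
      ((PySem.List.slice ([24, 60, 60] : List Int) (some (4 - (fields.length : Int))) none).zip rest).foldl
        (fun acc bf => acc.bind (fun t => (PySem.Int.ofStr? bf.2).map (fun v => t * bf.1 + v)))
        (some t0))

def dhms2sec_alt (dhms : String) : Option Int :=
  let d := if PySem.Str.endswith dhms ":" then dhms ++ "00" else dhms
  let nums := (PySem.Str.split? d ":").getD []
  if !(nums.any (fun n => PySem.Str.strIsdigit n)) then none
  else hornerB (PySem.List.slice nums (some (-4)) none)

-- ===== PRECONDITION & SPEC =====
-- Pre_ excludes exactly the inputs where the Python A raises: the empty string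
-- (IndexError on dhms[-1]) and inputs where some field is a digit string but one of
-- the last ≤4 fields of the padded string is not int()-parseable (ValueError).
def pvFields_dhms2sec (dhms : String) : List String :=
  (PySem.Str.split? (if PySem.Str.endswith dhms ":" then dhms ++ "00" else dhms) ":").getD []
def Pre_dhms2sec (dhms : String) : Prop :=
  dhms ≠ "" ∧
  ((pvFields_dhms2sec dhms).any (fun n => PySem.Str.strIsdigit n) = true →
    ((pvFields_dhms2sec dhms).reverse.take 4).all (fun n => (PySem.Int.ofStr? n).isSome) = true)
instance (dhms : String) : Decidable (Pre_dhms2sec dhms) := by unfold Pre_dhms2sec; infer_instance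
def pvWitness_dhms2sec : String := "1:2:3"

def Spec_dhms2sec (dhms : String) (out : Option Int) : Prop := out = dhms2sec_alt dhms
instance (dhms : String) (out : Option Int) : Decidable (Spec_dhms2sec dhms out) := by unfold Spec_dhms2sec; infer_instance

-- ===== CLAIM (what is proved, stated in full; the proofs are below) =====
def Claim_equal_dhms2sec : Prop := ∀ (dhms : String), Dom_dhms2sec dhms → Pre_dhms2sec dhms → Spec_dhms2sec dhms (dhms2sec dhms)

-- ===== LEMMAS AND PROOFS =====

-- The two padding tests agree: dhms[-1] == ':'  ⟺  dhms.endswith(':').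
lemma pad_eq (s : String) :
    (PySem.Str.pyGet? s (-1) == some ':') = PySem.Str.endswith s ":" := by
  rw [PySem.Str.pyGet?_eq, PySem.Str.endswith_eq]
  generalize s.toList = l
  rcases List.eq_nil_or_concat l with rfl | ⟨l', c, rfl⟩
  · decide
  · apply Bool.eq_iff_iff.mpr
    simp [PySem.Chars.pyGet?_eq_listPyGet?, PySem.List.pyGet?_neg_one_append_singleton,
      PySem.Chars.endswith_iff, show (":" : String).toList = [':'] from rfl]
    constructor
    · rintro rfl; exact ⟨l', rfl⟩
    · rintro ⟨t, ht⟩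
      have := (List.append_inj' ht rfl).2
      simpa using this.symm

lemma pop1 {α : Type} (x : α) : PySem.List.pop? [x] = some (x, []) := by
  simpa using PySem.List.pop?_last [] x

-- nums[-4:] keeps the last min(4, len) elements.
lemma slice4 {α : Type} (xs : List α) :
    PySem.List.slice xs (some (-4)) none = xs.drop (xs.length - 4) := by
  exact PySem.List.slice_from_neg_ofNat xs 4 (by omega)

-- A's pop cascade and B's Horner fold agree on any non-empty field list.
lemma pop2 {α : Type} (x y : α) : PySem.List.pop? [x, y] = some (y, [x]) := by
  simpa using PySem.List.pop?_last [x] y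

lemma pop3 {α : Type} (x y z : α) : PySem.List.pop? [x, y, z] = some (z, [x, y]) := by
  simpa using PySem.List.pop?_last [x, y] z

lemma cascade_eq_horner (ns : List String) (h : ns ≠ []) :
    cascadeA ns = hornerB (PySem.List.slice ns (some (-4)) none) := by
  rw [slice4]
  rcases List.eq_nil_or_concat ns with rfl | ⟨r1, a, rfl⟩
  · exact absurd rfl h
  rcases List.eq_nil_or_concat r1 with rfl | ⟨r2, b, rfl⟩
  case inl =>
    rcases h0 : PySem.Int.ofStr? a with _ | va <;>
      simp [cascadeA, hornerB, pop1, h0, PySem.List.slice, PySem.List.clampIdx]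
  rcases List.eq_nil_or_concat r2 with rfl | ⟨r3, c, rfl⟩
  case inl =>
    rcases h0 : PySem.Int.ofStr? a with _ | va <;> rcases h1 : PySem.Int.ofStr? b with _ | vb <;>
      simp [cascadeA, hornerB, pop1, pop2, h0, h1, PySem.List.slice, PySem.List.clampIdx] <;> ring
  rcases List.eq_nil_or_concat r3 with rfl | ⟨r4, d, rfl⟩
  case inl =>
    rcases h0 : PySem.Int.ofStr? a with _ | va <;> rcases h1 : PySem.Int.ofStr? b with _ | vb <;>
      rcases h2 : PySem.Int.ofStr? c with _ | vc <;>
      simp [cascadeA, hornerB, pop1, pop2, pop3, h0, h1, h2,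
        PySem.List.slice, PySem.List.clampIdx] <;> ring
  case inr =>
    simp only [List.concat_eq_append, List.append_assoc, List.singleton_append]
    have hlen : (r4 ++ [d, c, b, a]).length - 4 = r4.length := by
      simp [List.length_append]
    have hdrop : (r4 ++ [d, c, b, a]).drop ((r4 ++ [d, c, b, a]).length - 4) = [d, c, b, a] := by
      rw [hlen]; simp
    have p0 : PySem.List.pop? (r4 ++ [d, c, b, a]) = some (a, r4 ++ [d, c, b]) := by
      simpa using PySem.List.pop?_last (r4 ++ [d, c, b]) a
    have p1 : PySem.List.pop? (r4 ++ [d, c, b]) = some (b, r4 ++ [d, c]) := by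
      simpa using PySem.List.pop?_last (r4 ++ [d, c]) b
    have p2 : PySem.List.pop? (r4 ++ [d, c]) = some (c, r4 ++ [d]) := by
      simpa using PySem.List.pop?_last (r4 ++ [d]) c
    have p3 : PySem.List.pop? (r4 ++ [d]) = some (d, r4) := by
      simpa using PySem.List.pop?_last r4 d
    rw [show [d, c] ++ [b, a] = ([d, c, b, a] : List String) from rfl, hdrop]
    rcases h0 : PySem.Int.ofStr? a with _ | va <;> rcases h1 : PySem.Int.ofStr? b with _ | vb <;>
      rcases h2 : PySem.Int.ofStr? c with _ | vc <;> rcases h3 : PySem.Int.ofStr? d with _ | vd <;>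
      simp [cascadeA, hornerB, p0, p1, p2, p3, h0, h1, h2, h3,
        PySem.List.slice, PySem.List.clampIdx] <;> ring

-- ===== VERDICT (by name: the statement is the Claim_ definition above) =====
theorem dhms2sec_spec : Claim_equal_dhms2sec := by
  intro dhms _ _
  unfold Spec_dhms2sec dhms2sec dhms2sec_alt
  rw [pad_eq]
  dsimp only
  generalize (PySem.Str.split? (if PySem.Str.endswith dhms ":" then dhms ++ "00" else dhms)
      ":").getD [] = nums
  rcases hg : nums.any (fun n => PySem.Str.strIsdigit n)
  · have hall := List.any_eq_false.mp hg
    have hfil : nums.filter (fun n => PySem.Str.strIsdigit n) = [] := by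
      simp only [List.filter_eq_nil_iff]
      exact fun x hx => by simpa using hall x hx
    simp [hfil]
    intro x hx hdx
    exact absurd (by simpa using hdx) (hall x hx)
  · have hne : nums ≠ [] := by rintro rfl; simp at hg
    have hfil : nums.filter (fun n => PySem.Str.strIsdigit n) ≠ [] := by
      simp only [ne_eq, List.filter_eq_nil_iff]
      obtain ⟨x, hx, hpx⟩ := List.any_eq_true.mp hg
      exact fun hc => hc x hx (by simpa using hpx)
    simp only [hfil, ne_eq, not_false_eq_true, if_true, Bool.not_true,
      Bool.false_eq_true, if_false]
    exact cascade_eq_horner nums hne
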